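-- pv_equiv track=rewrite | github.com/HoodHou/External-git-DG-DividedMustMerge | table_merge_tool/exporter.py | _aggregate_file_entry_totals
-- ===== SOURCE A (Python) =====
-- ROW_STATUS_LABELS = {
--     "same": "相同",
--     "conflict": "冲突",
--     "left_only": "左独有",
--     "right_only": "右独有",
--     "deleted": "删除",
-- }
--
-- def _summarize_rows_by_sheet(rows: list[dict[str, str]]) -> list[dict]:
--     order: list[str] = []
--     by_sheet: dict[str, dict] = {}
--     for item in rows:
--         sheet_name = item["sheet_name"]
--         if sheet_name not in by_sheet:
--             order.append(sheet_name)
--             by_sheet[sheet_name] = {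
--                 "sheet_name": sheet_name,
--                 "diff_row_keys": set(),
--                 "status_keys": {status: set() for status in ROW_STATUS_LABELS},
--                 "field_count": 0,
--             }
--         bucket = by_sheet[sheet_name]
--         row_key = item["alignment_row"]
--         bucket["diff_row_keys"].add(row_key)
--         status = item["row_status"]
--         bucket["status_keys"].setdefault(status, set()).add(row_key)
--         bucket["field_count"] += 1
--     summaries: list[dict] = []
--     for sheet_name in order:
--         bucket = by_sheet[sheet_name]
--         summaries.append(
--             {
--                 "sheet_name": sheet_name,
--                 "diff_rows": len(bucket["diff_row_keys"]),
--                 "field_count": bucket["field_count"],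
--                 "conflict": len(bucket["status_keys"].get("conflict", set())),
--                 "left_only": len(bucket["status_keys"].get("left_only", set())),
--                 "right_only": len(bucket["status_keys"].get("right_only", set())),
--                 "deleted": len(bucket["status_keys"].get("deleted", set())),
--                 "same": len(bucket["status_keys"].get("same", set())),
--             }
--         )
--     return summaries
--
-- def _aggregate_file_entry_totals(entry: dict) -> dict[str, int]:
--     rows = entry.get("rows") or []
--     sheet_summaries = _summarize_rows_by_sheet(rows)
--     totals = {
--         "sheets": len(sheet_summaries),
--         "diff_rows": sum(summary["diff_rows"] for summary in sheet_summaries),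
--         "conflict": sum(summary["conflict"] for summary in sheet_summaries),
--         "left_only": sum(summary["left_only"] for summary in sheet_summaries),
--         "right_only": sum(summary["right_only"] for summary in sheet_summaries),
--         "deleted": sum(summary["deleted"] for summary in sheet_summaries),
--     }
--     return totals
-- ===== SOURCE B (Python) =====
-- def _aggregate_file_entry_totals(entry: dict) -> dict[str, int]:
--     rows = entry.get("rows") or []
--     sheets = set()
--     diff = set()
--     conflict = set()
--     left_only = set()
--     right_only = set()
--     deleted = set()
--     for item in rows:
--         name = item["sheet_name"]
--         key = item["alignment_row"]
--         status = item["row_status"]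
--         sheets.add(name)
--         diff.add((name, key))
--         if status == "conflict":
--             conflict.add((name, key))
--         elif status == "left_only":
--             left_only.add((name, key))
--         elif status == "right_only":
--             right_only.add((name, key))
--         elif status == "deleted":
--             deleted.add((name, key))
--     return {
--         "sheets": len(sheets),
--         "diff_rows": len(diff),
--         "conflict": len(conflict),
--         "left_only": len(left_only),
--         "right_only": len(right_only),
--         "deleted": len(deleted),
--     }
-- ===== Notes on version B (the rewrite author's own statement) =====
-- stated objective: simpler
-- what changed: Replaces the per-sheet dict of buckets (per-sheet diff/status key sets plus a summarize-then-sum second pass) with one flat pass keeping a global set of sheet names and global sets of (sheet_name, alignment_row) tuples for diff and each counted status, returning the set sizes directly.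
import Mathlib
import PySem

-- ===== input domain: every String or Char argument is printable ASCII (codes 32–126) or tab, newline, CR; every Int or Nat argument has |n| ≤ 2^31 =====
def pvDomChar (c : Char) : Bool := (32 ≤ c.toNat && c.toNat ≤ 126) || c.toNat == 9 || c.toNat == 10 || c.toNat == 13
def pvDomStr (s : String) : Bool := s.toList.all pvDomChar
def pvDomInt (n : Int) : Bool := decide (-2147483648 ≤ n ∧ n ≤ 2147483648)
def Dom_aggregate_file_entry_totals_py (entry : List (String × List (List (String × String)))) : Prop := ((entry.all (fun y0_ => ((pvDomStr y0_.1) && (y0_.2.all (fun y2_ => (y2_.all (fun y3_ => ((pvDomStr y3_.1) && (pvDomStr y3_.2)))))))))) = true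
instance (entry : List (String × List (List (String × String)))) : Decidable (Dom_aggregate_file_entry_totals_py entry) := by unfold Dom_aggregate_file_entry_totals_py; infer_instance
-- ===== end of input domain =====

-- B replaces A's per-sheet dict of buckets plus a summarize-then-sum second pass by one flat pass over the
-- rows keeping global sets of sheet names and (sheet_name, alignment_row) tuples (objective: simpler).

-- ===== PORT A =====
-- dict lookup item[k] (KeyError excluded by Pre_; the "" default is never reached inside Pre_)
def rowGet (r : List (String × String)) (k : String) : String :=
  ((PySem.Dict.mk r).get? k).getD ""

structure PyBucket where
  sheet_name : String
  diff_row_keys : PySem.Set String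
  status_keys : PySem.Dict String (PySem.Set String)
  field_count : Int
deriving Repr, DecidableEq

structure PySummary where
  sheet_name : String
  diff_rows : Int
  field_count : Int
  conflict : Int
  left_only : Int
  right_only : Int
  deleted : Int
  same : Int
deriving Repr, DecidableEq

-- {status: set() for status in ROW_STATUS_LABELS}
def initStatusKeys : PySem.Dict String (PySem.Set String) :=
  PySem.Dict.ofList [("same", []), ("conflict", []), ("left_only", []), ("right_only", []), ("deleted", [])]

def emptyBucket : PyBucket := ⟨"", PySem.Set.empty, initStatusKeys, 0⟩

-- the summary dict appended for one sheet in A's second loop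
def mkSummary (d : PySem.Dict String PyBucket) (sheet_name : String) : PySummary :=
  let bucket := (d.get? sheet_name).getD emptyBucket
  { sheet_name := sheet_name
    diff_rows := (bucket.diff_row_keys.length : Int)
    field_count := bucket.field_count
    conflict := ((bucket.status_keys.getD "conflict" PySem.Set.empty).length : Int)
    left_only := ((bucket.status_keys.getD "left_only" PySem.Set.empty).length : Int)
    right_only := ((bucket.status_keys.getD "right_only" PySem.Set.empty).length : Int)
    deleted := ((bucket.status_keys.getD "deleted" PySem.Set.empty).length : Int)
    same := ((bucket.status_keys.getD "same" PySem.Set.empty).length : Int) }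

def summarize_rows_by_sheet (rows : List (List (String × String))) : List PySummary :=
  let st := rows.foldl (fun (s : List String × PySem.Dict String PyBucket) item =>
      let sheet_name := rowGet item "sheet_name"
      let s := if s.2.contains sheet_name then s
               else (s.1 ++ [sheet_name],
                     s.2.insert sheet_name ⟨sheet_name, PySem.Set.empty, initStatusKeys, 0⟩)
      let bucket := (s.2.get? sheet_name).getD emptyBucket
      let row_key := rowGet item "alignment_row"
      let bucket := { bucket with diff_row_keys := PySem.Set.add bucket.diff_row_keys row_key }
      let status := rowGet item "row_status"
      let bucket := { bucket with status_keys :=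
                        bucket.status_keys.modify status PySem.Set.empty (fun t => PySem.Set.add t row_key) }
      let bucket := { bucket with field_count := bucket.field_count + 1 }
      (s.1, s.2.insert sheet_name bucket))
    ([], PySem.Dict.empty)
  st.1.map (mkSummary st.2)

def aggregate_file_entry_totals_py (entry : List (String × List (List (String × String)))) : List (String × Int) :=
  let rows := ((PySem.Dict.mk entry).get? "rows").getD []
  let sheet_summaries := summarize_rows_by_sheet rows
  [("sheets", (sheet_summaries.length : Int)),
   ("diff_rows", (sheet_summaries.map (·.diff_rows)).sum),
   ("conflict", (sheet_summaries.map (·.conflict)).sum),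
   ("left_only", (sheet_summaries.map (·.left_only)).sum),
   ("right_only", (sheet_summaries.map (·.right_only)).sum),
   ("deleted", (sheet_summaries.map (·.deleted)).sum)]

-- ===== PORT B =====
structure BState where
  sheets : PySem.Set String
  diff : PySem.Set (String × String)
  conflict : PySem.Set (String × String)
  left_only : PySem.Set (String × String)
  right_only : PySem.Set (String × String)
  deleted : PySem.Set (String × String)
deriving Repr, DecidableEq

def aggregate_file_entry_totals_py_alt (entry : List (String × List (List (String × String)))) : List (String × Int) :=
  let rows := ((PySem.Dict.mk entry).get? "rows").getD []
  let st := rows.foldl (fun (b : BState) item =>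
      let name := rowGet item "sheet_name"
      let key := rowGet item "alignment_row"
      let status := rowGet item "row_status"
      let b := { b with sheets := PySem.Set.add b.sheets name,
                        diff := PySem.Set.add b.diff (name, key) }
      if status == "conflict" then { b with conflict := PySem.Set.add b.conflict (name, key) }
      else if status == "left_only" then { b with left_only := PySem.Set.add b.left_only (name, key) }
      else if status == "right_only" then { b with right_only := PySem.Set.add b.right_only (name, key) }
      else if status == "deleted" then { b with deleted := PySem.Set.add b.deleted (name, key) }
      else b)
    ⟨[], [], [], [], [], []⟩
  [("sheets", (st.sheets.length : Int)),
   ("diff_rows", (st.diff.length : Int)),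
   ("conflict", (st.conflict.length : Int)),
   ("left_only", (st.left_only.length : Int)),
   ("right_only", (st.right_only.length : Int)),
   ("deleted", (st.deleted.length : Int))]

-- ===== PRECONDITION & SPEC =====
-- Pre_ excludes exactly the inputs where A raises KeyError: a row missing one of the three required keys.
def Pre_aggregate_file_entry_totals_py (entry : List (String × List (List (String × String)))) : Prop :=
  ∀ r ∈ ((PySem.Dict.mk entry).get? "rows").getD [],
    (PySem.Dict.mk r).contains "sheet_name" = true ∧
    (PySem.Dict.mk r).contains "alignment_row" = true ∧
    (PySem.Dict.mk r).contains "row_status" = true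
instance (entry : List (String × List (List (String × String)))) : Decidable (Pre_aggregate_file_entry_totals_py entry) := by
  unfold Pre_aggregate_file_entry_totals_py; infer_instance

def pvWitness_aggregate_file_entry_totals_py : (List (String × List (List (String × String)))) :=
  [("rows", [[("sheet_name", "S"), ("alignment_row", "1"), ("row_status", "conflict")]])]

def Spec_aggregate_file_entry_totals_py (entry : List (String × List (List (String × String)))) (out : List (String × Int)) : Prop := out = aggregate_file_entry_totals_py_alt entry
instance (entry : List (String × List (List (String × String)))) (out : List (String × Int)) : Decidable (Spec_aggregate_file_entry_totals_py entry out) := by unfold Spec_aggregate_file_entry_totals_py; infer_instance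

-- ===== CLAIM (what is proved, stated in full; the proofs are below) =====
def Claim_equal_aggregate_file_entry_totals_py : Prop := ∀ (entry : List (String × List (List (String × String)))), Dom_aggregate_file_entry_totals_py entry → Pre_aggregate_file_entry_totals_py entry → Spec_aggregate_file_entry_totals_py entry (aggregate_file_entry_totals_py entry)

-- ===== LEMMAS AND PROOFS =====

def tripOf (item : List (String × String)) : String × String × String :=
  (rowGet item "sheet_name", rowGet item "alignment_row", rowGet item "row_status")

def stepA (s : List String × PySem.Dict String PyBucket) (t : String × String × String) :
    List String × PySem.Dict String PyBucket :=
  let sheet_name := t.1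
  let s := if s.2.contains sheet_name then s
           else (s.1 ++ [sheet_name],
                 s.2.insert sheet_name ⟨sheet_name, PySem.Set.empty, initStatusKeys, 0⟩)
  let bucket := (s.2.get? sheet_name).getD emptyBucket
  let row_key := t.2.1
  let bucket := { bucket with diff_row_keys := PySem.Set.add bucket.diff_row_keys row_key }
  let status := t.2.2
  let bucket := { bucket with status_keys :=
                    bucket.status_keys.modify status PySem.Set.empty (fun u => PySem.Set.add u row_key) }
  let bucket := { bucket with field_count := bucket.field_count + 1 }
  (s.1, s.2.insert sheet_name bucket)

def stepB (b : BState) (t : String × String × String) : BState :=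
  let name := t.1
  let key := t.2.1
  let status := t.2.2
  let b := { b with sheets := PySem.Set.add b.sheets name,
                    diff := PySem.Set.add b.diff (name, key) }
  if status == "conflict" then { b with conflict := PySem.Set.add b.conflict (name, key) }
  else if status == "left_only" then { b with left_only := PySem.Set.add b.left_only (name, key) }
  else if status == "right_only" then { b with right_only := PySem.Set.add b.right_only (name, key) }
  else if status == "deleted" then { b with deleted := PySem.Set.add b.deleted (name, key) }
  else b

-- keys of the rows for sheet s, in order
def sheetRel (l : List (String × String)) (s : String) : List String :=
  (l.filter (fun x => x.1 == s)).map (·.2)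

def InvAB (order : List String) (d : PySem.Dict String PyBucket) (b : BState) : Prop :=
  b.sheets = order ∧
  d.keys = order ∧
  order.Nodup ∧
  (∀ x ∈ b.diff, x.1 ∈ order) ∧
  (∀ x ∈ b.conflict, x.1 ∈ order) ∧
  (∀ x ∈ b.left_only, x.1 ∈ order) ∧
  (∀ x ∈ b.right_only, x.1 ∈ order) ∧
  (∀ x ∈ b.deleted, x.1 ∈ order) ∧
  (∀ s bk, d.get? s = some bk →
     bk.diff_row_keys = sheetRel b.diff s ∧
     bk.status_keys.getD "conflict" PySem.Set.empty = sheetRel b.conflict s ∧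
     bk.status_keys.getD "left_only" PySem.Set.empty = sheetRel b.left_only s ∧
     bk.status_keys.getD "right_only" PySem.Set.empty = sheetRel b.right_only s ∧
     bk.status_keys.getD "deleted" PySem.Set.empty = sheetRel b.deleted s)

lemma sheetRel_add_self (D : List (String × String)) (n k : String) :
    PySem.Set.add (sheetRel D n) k = sheetRel (PySem.Set.add D (n, k)) n := by
  by_cases hm : (n, k) ∈ D
  · have h2 : k ∈ sheetRel D n := by
      simp only [sheetRel, List.mem_map, List.mem_filter]
      exact ⟨(n, k), ⟨hm, by simp⟩, rfl⟩
    simp [PySem.Set.add, PySem.Set.contains, hm, h2]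
  · have h2 : k ∉ sheetRel D n := by
      simp only [sheetRel, List.mem_map, List.mem_filter]
      rintro ⟨⟨a, b⟩, ⟨hmem, heq⟩, rfl⟩
      simp only [beq_iff_eq] at heq
      exact hm (heq ▸ hmem)
    simp [sheetRel, PySem.Set.add, PySem.Set.contains, hm, List.filter_append]
lemma sheetRel_add_ne (D : List (String × String)) (n k s : String) (h : s ≠ n) :
    sheetRel (PySem.Set.add D (n, k)) s = sheetRel D s := by
  by_cases hm : (n, k) ∈ D
  · simp [PySem.Set.add, PySem.Set.contains, hm]
  · simp [PySem.Set.add, PySem.Set.contains, hm, sheetRel, List.filter_append,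
      (by simpa using h.symm : ¬ (n = s))]

lemma sheetRel_nil (D : List (String × String)) (s : String) (h : ∀ x ∈ D, x.1 ≠ s) :
    sheetRel D s = [] := by
  simp only [sheetRel, List.map_eq_nil_iff, List.filter_eq_nil_iff]
  intro x hx
  simpa using h x hx

lemma sum_sheetRel (os : List String) (l : List (String × String)) (hnd : os.Nodup)
    (hm : ∀ x ∈ l, x.1 ∈ os) :
    (os.map (fun s => ((sheetRel l s).length : Int))).sum = (l.length : Int) := by
  induction os generalizing l with
  | nil =>
    have : l = [] := by
      cases l with
      | nil => rfl
      | cons a t => exact absurd (hm a (List.mem_cons_self)) (by simp)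
    simp [this]
  | cons s os' ih =>
    have hnd' := hnd.of_cons
    have hs : s ∉ os' := by simpa using (List.nodup_cons.mp hnd).1
    have hcongr : ∀ t ∈ os', sheetRel l t = sheetRel (l.filter (fun x => !(x.1 == s))) t := by
      intro t ht
      have hts : t ≠ s := fun h => hs (h ▸ ht)
      simp only [sheetRel, List.filter_filter]
      congr 1
      apply List.filter_congr
      intro x _
      cases hb : (x.1 == t) <;> cases hb2 : (x.1 == s) <;> simp_all
    have hmapeq : os'.map (fun t => ((sheetRel l t).length : Int))
        = os'.map (fun t => ((sheetRel (l.filter (fun x => !(x.1 == s))) t).length : Int)) :=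
      List.map_congr_left (fun t ht => by rw [hcongr t ht])
    have ih' := ih (l.filter (fun x => !(x.1 == s))) hnd'
      (by
        intro x hx
        rw [List.mem_filter] at hx
        have := hm x hx.1
        rcases List.mem_cons.mp this with h | h
        · exfalso
          have hx2 := hx.2
          simp only [h, beq_self_eq_true, Bool.not_true] at hx2
          exact absurd hx2 Bool.false_ne_true
        · exact h)
    rw [List.map_cons, List.sum_cons, hmapeq, ih']
    have h3 : l.length = (l.filter (fun x => x.1 == s)).length
        + (l.filter (fun x => !(x.1 == s))).length := by
      simpa using List.length_eq_length_filter_add (l := l) (fun x => x.1 == s)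
    simp only [sheetRel, List.length_map]
    omega

lemma mem_set_add {α : Type} [BEq α] [LawfulBEq α] (s : PySem.Set α) (x y : α) :
    y ∈ PySem.Set.add s x ↔ y ∈ s ∨ y = x := by
  by_cases hm : x ∈ s
  · simp [PySem.Set.add, PySem.Set.contains, hm]
    intro h; subst h; exact hm
  · simp [PySem.Set.add, PySem.Set.contains, hm]

lemma set_add_mem {α : Type} [BEq α] [LawfulBEq α] (s : PySem.Set α) (x : α) (h : x ∈ s) :
    PySem.Set.add s x = s := by
  simp [PySem.Set.add, PySem.Set.contains, h]

lemma set_add_not_mem {α : Type} [BEq α] [LawfulBEq α] (s : PySem.Set α) (x : α) (h : x ∉ s) :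
    PySem.Set.add s x = s ++ [x] := by
  simp [PySem.Set.add, PySem.Set.contains, h]

lemma sheetRel_add_if (D : List (String × String)) (n k s : String) (c : Bool) (h : s ≠ n) :
    sheetRel (if c then PySem.Set.add D (n, k) else D) s = sheetRel D s := by
  split
  · exact sheetRel_add_ne D n k s h
  · rfl

lemma stat_self (sk : PySem.Dict String (PySem.Set String)) (C : List (String × String))
    (n k st c : String) (hc : sk.getD c PySem.Set.empty = sheetRel C n) :
    (sk.modify st PySem.Set.empty (fun u => PySem.Set.add u k)).getD c PySem.Set.empty
      = sheetRel (if st == c then PySem.Set.add C (n, k) else C) n := by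
  by_cases h : st = c
  · subst h
    rw [PySem.Dict.getD_modify_self, hc, if_pos (by simp)]
    exact sheetRel_add_self C n k
  · rw [PySem.Dict.getD_modify_of_ne _ _ _ (Ne.symm h), hc, if_neg (by simp [h])]

def updBucket (bk : PyBucket) (k st : String) : PyBucket :=
  { bk with diff_row_keys := PySem.Set.add bk.diff_row_keys k,
            status_keys := bk.status_keys.modify st PySem.Set.empty (fun u => PySem.Set.add u k),
            field_count := bk.field_count + 1 }

lemma stepA_contains (order : List String) (d : PySem.Dict String PyBucket)
    (t : String × String × String) (h : d.contains t.1 = true) :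
    stepA (order, d) t = (order, d.insert t.1 (updBucket ((d.get? t.1).getD emptyBucket) t.2.1 t.2.2)) := by
  simp [stepA, updBucket, h]

lemma stepA_not_contains (order : List String) (d : PySem.Dict String PyBucket)
    (t : String × String × String) (h : d.contains t.1 = false) :
    stepA (order, d) t = (order ++ [t.1],
      d.insert t.1 (updBucket ⟨t.1, PySem.Set.empty, initStatusKeys, 0⟩ t.2.1 t.2.2)) := by
  simp [stepA, updBucket, h, PySem.Dict.get?_insert_self, PySem.Dict.insert_insert_self]

lemma stepB_sheets (b : BState) (t : String × String × String) :
    (stepB b t).sheets = PySem.Set.add b.sheets t.1 := by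
  simp only [stepB]; split_ifs <;> rfl

lemma stepB_diff (b : BState) (t : String × String × String) :
    (stepB b t).diff = PySem.Set.add b.diff (t.1, t.2.1) := by
  simp only [stepB]; split_ifs <;> rfl

lemma stepB_conflict (b : BState) (t : String × String × String) :
    (stepB b t).conflict = if t.2.2 == "conflict" then PySem.Set.add b.conflict (t.1, t.2.1) else b.conflict := by
  simp only [stepB]; split_ifs <;> simp_all

lemma stepB_left_only (b : BState) (t : String × String × String) :
    (stepB b t).left_only = if t.2.2 == "left_only" then PySem.Set.add b.left_only (t.1, t.2.1) else b.left_only := by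
  simp only [stepB]; split_ifs <;> simp_all

lemma stepB_right_only (b : BState) (t : String × String × String) :
    (stepB b t).right_only = if t.2.2 == "right_only" then PySem.Set.add b.right_only (t.1, t.2.1) else b.right_only := by
  simp only [stepB]; split_ifs <;> simp_all

lemma stepB_deleted (b : BState) (t : String × String × String) :
    (stepB b t).deleted = if t.2.2 == "deleted" then PySem.Set.add b.deleted (t.1, t.2.1) else b.deleted := by
  simp only [stepB]; split_ifs <;> simp_all

lemma mem_if_add (C : List (String × String)) (n k : String) (c : Bool) (order : List String)
    (hC : ∀ x ∈ C, x.1 ∈ order) (hn : n ∈ order) :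
    ∀ x ∈ (if c then PySem.Set.add C (n, k) else C), x.1 ∈ order := by
  intro x hx
  split at hx
  · rcases (mem_set_add C (n, k) x).mp hx with h | h
    · exact hC x h
    · subst h; exact hn
  · exact hC x hx

lemma step_preserves (order : List String) (d : PySem.Dict String PyBucket) (b : BState)
    (t : String × String × String) (h : InvAB order d b) :
    InvAB (stepA (order, d) t).1 (stepA (order, d) t).2 (stepB b t) := by
  obtain ⟨n, k, st⟩ := t
  obtain ⟨hsheets, hkeys, hnd, hdiff, hco, hlo, hro, hde, hbuckets⟩ := h
  by_cases hc1 : d.contains n = true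
  · -- sheet already present
    have hnord : n ∈ order := by
      rw [← hkeys]; exact (PySem.Dict.contains_iff_mem_keys d n).mp hc1
    obtain ⟨bk0, hbk0⟩ : ∃ bk, d.get? n = some bk := by
      rw [PySem.Dict.contains_eq_isSome_get?] at hc1
      exact Option.isSome_iff_exists.mp hc1
    obtain ⟨hb1, hb2, hb3, hb4, hb5⟩ := hbuckets n bk0 hbk0
    rw [stepA_contains order d (n, k, st) hc1]
    refine ⟨?_, ?_, hnd, ?_, ?_, ?_, ?_, ?_, ?_⟩
    · rw [stepB_sheets, hsheets, set_add_mem _ _ hnord]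
    · simpa [PySem.Dict.keys_insert_of_contains _ _ hc1] using hkeys
    · rw [stepB_diff]
      intro x hx
      rcases (mem_set_add b.diff (n, k) x).mp hx with hh | hh
      · exact hdiff x hh
      · subst hh; exact hnord
    · rw [stepB_conflict]; exact mem_if_add b.conflict n k _ order hco hnord
    · rw [stepB_left_only]; exact mem_if_add b.left_only n k _ order hlo hnord
    · rw [stepB_right_only]; exact mem_if_add b.right_only n k _ order hro hnord
    · rw [stepB_deleted]; exact mem_if_add b.deleted n k _ order hde hnord
    · intro s bk hget
      by_cases hsn : s = n
      · subst hsn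
        rw [PySem.Dict.get?_insert_self] at hget
        cases hget
        rw [hbk0]
        refine ⟨?_, ?_, ?_, ?_, ?_⟩
        · show PySem.Set.add bk0.diff_row_keys k = _
          rw [stepB_diff, hb1]
          exact sheetRel_add_self b.diff s k
        · rw [stepB_conflict]
          exact stat_self bk0.status_keys b.conflict s k st "conflict" hb2
        · rw [stepB_left_only]
          exact stat_self bk0.status_keys b.left_only s k st "left_only" hb3
        · rw [stepB_right_only]
          exact stat_self bk0.status_keys b.right_only s k st "right_only" hb4
        · rw [stepB_deleted]
          exact stat_self bk0.status_keys b.deleted s k st "deleted" hb5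
      · rw [PySem.Dict.get?_insert_of_ne _ _ hsn] at hget
        obtain ⟨hb1', hb2', hb3', hb4', hb5'⟩ := hbuckets s bk hget
        refine ⟨?_, ?_, ?_, ?_, ?_⟩
        · rw [stepB_diff, sheetRel_add_ne b.diff n k s hsn]; exact hb1'
        · rw [stepB_conflict, sheetRel_add_if b.conflict n k s _ hsn]; exact hb2'
        · rw [stepB_left_only, sheetRel_add_if b.left_only n k s _ hsn]; exact hb3'
        · rw [stepB_right_only, sheetRel_add_if b.right_only n k s _ hsn]; exact hb4'
        · rw [stepB_deleted, sheetRel_add_if b.deleted n k s _ hsn]; exact hb5'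
  · -- fresh sheet
    have hc2 : d.contains n = false := by simpa using hc1
    have hnord : n ∉ order := by
      rw [← hkeys]
      intro hmem
      exact hc1 ((PySem.Dict.contains_iff_mem_keys d n).mpr hmem)
    have hfresh : ∀ (C : List (String × String)), (∀ x ∈ C, x.1 ∈ order) → sheetRel C n = [] := by
      intro C hC
      exact sheetRel_nil C n (fun x hx he => hnord (he ▸ hC x hx))
    rw [stepA_not_contains order d (n, k, st) hc2]
    refine ⟨?_, ?_, ?_, ?_, ?_, ?_, ?_, ?_, ?_⟩
    · rw [stepB_sheets, hsheets, set_add_not_mem _ _ hnord]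
    · rw [PySem.Dict.keys_insert_of_not_contains _ _ hc2, hkeys]
    · simp only [List.nodup_append, List.nodup_cons, List.not_mem_nil, not_false_iff, List.nodup_nil, and_true]
      exact ⟨hnd, by simpa using fun a ha (he : a = n) => hnord (he ▸ ha)⟩
    · rw [stepB_diff]
      intro x hx
      rcases (mem_set_add b.diff (n, k) x).mp hx with hh | hh
      · exact List.mem_append_left _ (hdiff x hh)
      · subst hh; exact List.mem_append_right _ (List.mem_singleton_self n)
    · rw [stepB_conflict]
      exact mem_if_add b.conflict n k _ (order ++ [n])
        (fun x hx => List.mem_append_left _ (hco x hx)) (List.mem_append_right _ (List.mem_singleton_self n))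
    · rw [stepB_left_only]
      exact mem_if_add b.left_only n k _ (order ++ [n])
        (fun x hx => List.mem_append_left _ (hlo x hx)) (List.mem_append_right _ (List.mem_singleton_self n))
    · rw [stepB_right_only]
      exact mem_if_add b.right_only n k _ (order ++ [n])
        (fun x hx => List.mem_append_left _ (hro x hx)) (List.mem_append_right _ (List.mem_singleton_self n))
    · rw [stepB_deleted]
      exact mem_if_add b.deleted n k _ (order ++ [n])
        (fun x hx => List.mem_append_left _ (hde x hx)) (List.mem_append_right _ (List.mem_singleton_self n))
    · intro s bk hget
      by_cases hsn : s = n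
      · subst hsn
        rw [PySem.Dict.get?_insert_self] at hget
        cases hget
        refine ⟨?_, ?_, ?_, ?_, ?_⟩
        · show PySem.Set.add PySem.Set.empty k = _
          rw [stepB_diff, ← sheetRel_add_self b.diff s k, hfresh b.diff hdiff]
          rfl
        · rw [stepB_conflict]
          exact stat_self initStatusKeys b.conflict s k st "conflict"
            (by rw [hfresh b.conflict hco]; rfl)
        · rw [stepB_left_only]
          exact stat_self initStatusKeys b.left_only s k st "left_only"
            (by rw [hfresh b.left_only hlo]; rfl)
        · rw [stepB_right_only]
          exact stat_self initStatusKeys b.right_only s k st "right_only"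
            (by rw [hfresh b.right_only hro]; rfl)
        · rw [stepB_deleted]
          exact stat_self initStatusKeys b.deleted s k st "deleted"
            (by rw [hfresh b.deleted hde]; rfl)
      · rw [PySem.Dict.get?_insert_of_ne _ _ hsn] at hget
        obtain ⟨hb1', hb2', hb3', hb4', hb5'⟩ := hbuckets s bk hget
        refine ⟨?_, ?_, ?_, ?_, ?_⟩
        · rw [stepB_diff, sheetRel_add_ne b.diff n k s hsn]; exact hb1'
        · rw [stepB_conflict, sheetRel_add_if b.conflict n k s _ hsn]; exact hb2'
        · rw [stepB_left_only, sheetRel_add_if b.left_only n k s _ hsn]; exact hb3'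
        · rw [stepB_right_only, sheetRel_add_if b.right_only n k s _ hsn]; exact hb4'
        · rw [stepB_deleted, sheetRel_add_if b.deleted n k s _ hsn]; exact hb5' 

lemma fold_inv (ts : List (String × String × String)) (order : List String)
    (d : PySem.Dict String PyBucket) (b : BState) (h : InvAB order d b) :
    InvAB (ts.foldl stepA (order, d)).1 (ts.foldl stepA (order, d)).2 (ts.foldl stepB b) := by
  induction ts generalizing order d b with
  | nil => exact h
  | cons t ts ih =>
    simpa using ih (stepA (order, d) t).1 (stepA (order, d) t).2 (stepB b t)
      (step_preserves order d b t h)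

lemma foldA_eq (rows : List (List (String × String)))
    (init : List String × PySem.Dict String PyBucket) :
    rows.foldl (fun (s : List String × PySem.Dict String PyBucket) item =>
      let sheet_name := rowGet item "sheet_name"
      let s := if s.2.contains sheet_name then s
               else (s.1 ++ [sheet_name],
                     s.2.insert sheet_name ⟨sheet_name, PySem.Set.empty, initStatusKeys, 0⟩)
      let bucket := (s.2.get? sheet_name).getD emptyBucket
      let row_key := rowGet item "alignment_row"
      let bucket := { bucket with diff_row_keys := PySem.Set.add bucket.diff_row_keys row_key }
      let status := rowGet item "row_status"
      let bucket := { bucket with status_keys :=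
                        bucket.status_keys.modify status PySem.Set.empty (fun t => PySem.Set.add t row_key) }
      let bucket := { bucket with field_count := bucket.field_count + 1 }
      (s.1, s.2.insert sheet_name bucket)) init
    = (rows.map tripOf).foldl stepA init := by
  rw [List.foldl_map]
  rfl

lemma foldB_eq (rows : List (List (String × String))) (init : BState) :
    rows.foldl (fun (b : BState) item =>
      let name := rowGet item "sheet_name"
      let key := rowGet item "alignment_row"
      let status := rowGet item "row_status"
      let b := { b with sheets := PySem.Set.add b.sheets name,
                        diff := PySem.Set.add b.diff (name, key) }
      if status == "conflict" then { b with conflict := PySem.Set.add b.conflict (name, key) }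
      else if status == "left_only" then { b with left_only := PySem.Set.add b.left_only (name, key) }
      else if status == "right_only" then { b with right_only := PySem.Set.add b.right_only (name, key) }
      else if status == "deleted" then { b with deleted := PySem.Set.add b.deleted (name, key) }
      else b) init
    = (rows.map tripOf).foldl stepB init := by
  rw [List.foldl_map]
  rfl

lemma inv_init : InvAB [] PySem.Dict.empty ⟨[], [], [], [], [], []⟩ := by
  refine ⟨rfl, by simp [PySem.Dict.keys_empty], List.nodup_nil,
    by simp, by simp, by simp, by simp, by simp, ?_⟩
  intro s bk h
  rw [PySem.Dict.get?_empty] at h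
  cases h

-- ===== VERDICT (by name: the statement is the Claim_ definition above) =====
theorem aggregate_file_entry_totals_py_spec : Claim_equal_aggregate_file_entry_totals_py := by
  intro entry _ _
  unfold Spec_aggregate_file_entry_totals_py
  show aggregate_file_entry_totals_py entry = aggregate_file_entry_totals_py_alt entry
  simp only [aggregate_file_entry_totals_py, aggregate_file_entry_totals_py_alt,
    summarize_rows_by_sheet]
  rw [foldA_eq, foldB_eq]
  set ts := (((PySem.Dict.mk entry).get? "rows").getD []).map tripOf with hts
  set stA := ts.foldl stepA ([], PySem.Dict.empty) with hstA
  set stB := ts.foldl stepB ⟨[], [], [], [], [], []⟩ with hstB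
  obtain ⟨hsheets, hkeys, hnd, hdiff, hco, hlo, hro, hde, hbuckets⟩ :
      InvAB stA.1 stA.2 stB :=
    fold_inv ts [] PySem.Dict.empty ⟨[], [], [], [], [], []⟩ inv_init
  have hgets : ∀ s ∈ stA.1, ∃ bk, stA.2.get? s = some bk := by
    intro s hsmem
    have h1 : s ∈ stA.2.keys := hkeys ▸ hsmem
    have h2 := (PySem.Dict.contains_iff_mem_keys stA.2 s).mpr h1
    rw [PySem.Dict.contains_eq_isSome_get?] at h2
    exact Option.isSome_iff_exists.mp h2
  have e1 : ((stA.1.map (mkSummary stA.2)).length : Int) = (stB.sheets.length : Int) := by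
    rw [List.length_map, ← hsheets]
  have hsum : ∀ (proj : PySummary → Int) (C : List (String × String)),
      (∀ x ∈ C, x.1 ∈ stA.1) →
      (∀ s ∈ stA.1, proj (mkSummary stA.2 s) = ((sheetRel C s).length : Int)) →
      ((stA.1.map (mkSummary stA.2)).map proj).sum = (C.length : Int) := by
    intro proj C hC hpt
    rw [List.map_map,
      List.map_congr_left (f := proj ∘ mkSummary stA.2)
        (g := fun s => ((sheetRel C s).length : Int)) (fun s hsmem => hpt s hsmem),
      sum_sheetRel stA.1 C hnd hC]
  have e2 : ((stA.1.map (mkSummary stA.2)).map (fun x => x.diff_rows)).sum = (stB.diff.length : Int) := by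
    refine hsum _ stB.diff hdiff ?_
    intro s hsmem
    obtain ⟨bk, hbk⟩ := hgets s hsmem
    simp [mkSummary, hbk, (hbuckets s bk hbk).1]
  have e3 : ((stA.1.map (mkSummary stA.2)).map (fun x => x.conflict)).sum = (stB.conflict.length : Int) := by
    refine hsum _ stB.conflict hco ?_
    intro s hsmem
    obtain ⟨bk, hbk⟩ := hgets s hsmem
    simp [mkSummary, hbk]
    exact congrArg List.length (hbuckets s bk hbk).2.1
  have e4 : ((stA.1.map (mkSummary stA.2)).map (fun x => x.left_only)).sum = (stB.left_only.length : Int) := by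
    refine hsum _ stB.left_only hlo ?_
    intro s hsmem
    obtain ⟨bk, hbk⟩ := hgets s hsmem
    simp [mkSummary, hbk]
    exact congrArg List.length (hbuckets s bk hbk).2.2.1
  have e5 : ((stA.1.map (mkSummary stA.2)).map (fun x => x.right_only)).sum = (stB.right_only.length : Int) := by
    refine hsum _ stB.right_only hro ?_
    intro s hsmem
    obtain ⟨bk, hbk⟩ := hgets s hsmem
    simp [mkSummary, hbk]
    exact congrArg List.length (hbuckets s bk hbk).2.2.2.1
  have e6 : ((stA.1.map (mkSummary stA.2)).map (fun x => x.deleted)).sum = (stB.deleted.length : Int) := by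
    refine hsum _ stB.deleted hde ?_
    intro s hsmem
    obtain ⟨bk, hbk⟩ := hgets s hsmem
    simp [mkSummary, hbk]
    exact congrArg List.length (hbuckets s bk hbk).2.2.2.2
  simp only [List.cons.injEq, Prod.mk.injEq, and_true, true_and]
  exact ⟨e1, e2, e3, e4, e5, e6⟩
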